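-- pv_equiv track=rewrite | github.com/rdwj/docling-analysis-framework | src/docling_analysis_framework/core/chunking.py | _identify_structured_elements
-- ===== SOURCE A (Python) =====
-- from typing import List, Dict, Any, Optional
--
-- def _identify_structured_elements(markdown_content: str) -> List[Dict[str, Any]]:
--     """Identify tables, figures, and text sections"""
--     elements = []
--     lines = markdown_content.split('\n')
--
--     current_element = {'type': 'text', 'content': ''}
--
--     for line in lines:
--         # Check for table rows
--         if '|' in line and line.count('|') >= 2:
--             if current_element['type'] != 'table':
--                 # Save previous element
--                 if current_element['content'].strip():
--                     elements.append(current_element)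
--                 current_element = {'type': 'table', 'content': line + '\n'}
--             else:
--                 current_element['content'] += line + '\n'
--
--         # Check for figures/images
--         elif line.startswith('!['):
--             # Save previous element
--             if current_element['content'].strip():
--                 elements.append(current_element)
--
--             # Create figure element
--             elements.append({'type': 'figure', 'content': line})
--             current_element = {'type': 'text', 'content': ''}
--
--         else:
--             # Regular text
--             if current_element['type'] != 'text':
--                 # Save previous element
--                 if current_element['content'].strip():
--                     elements.append(current_element)
--                 current_element = {'type': 'text', 'content': line + '\n'}
--             else:
--                 current_element['content'] += line + '\n'
--
--     # Add final element
--     if current_element['content'].strip():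
--         elements.append(current_element)
--
--     return elements
-- ===== SOURCE B (Python) =====
-- from typing import List, Dict, Any
--
-- def _identify_structured_elements(markdown_content: str) -> List[Dict[str, Any]]:
--     """Identify tables, figures, and text sections (tag lines, then group runs)."""
--     def tag(line):
--         if '|' in line and line.count('|') >= 2:
--             return 'table'
--         if line.startswith('!['):
--             return 'figure'
--         return 'text'
--
--     lines = markdown_content.split('\n')
--     tags = [tag(l) for l in lines]
--     elements = []
--     i = 0
--     n = len(lines)
--     while i < n:
--         if tags[i] == 'figure':
--             elements.append({'type': 'figure', 'content': lines[i]})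
--             i += 1
--         else:
--             j = i + 1
--             while j < n and tags[j] == tags[i]:
--                 j += 1
--             content = ''.join(l + '\n' for l in lines[i:j])
--             if content.strip():
--                 elements.append({'type': tags[i], 'content': content})
--             i = j
--     return elements
-- ===== Notes on version B (the rewrite author's own statement) =====
-- stated objective: alternative
-- what changed: Replaces A's single-pass mutable state machine (current-element dict flushed on type changes) with a two-phase pass: tag every line first, then group maximal runs of equal non-figure tags into elements, emitting figures individually.
import Mathlib
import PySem

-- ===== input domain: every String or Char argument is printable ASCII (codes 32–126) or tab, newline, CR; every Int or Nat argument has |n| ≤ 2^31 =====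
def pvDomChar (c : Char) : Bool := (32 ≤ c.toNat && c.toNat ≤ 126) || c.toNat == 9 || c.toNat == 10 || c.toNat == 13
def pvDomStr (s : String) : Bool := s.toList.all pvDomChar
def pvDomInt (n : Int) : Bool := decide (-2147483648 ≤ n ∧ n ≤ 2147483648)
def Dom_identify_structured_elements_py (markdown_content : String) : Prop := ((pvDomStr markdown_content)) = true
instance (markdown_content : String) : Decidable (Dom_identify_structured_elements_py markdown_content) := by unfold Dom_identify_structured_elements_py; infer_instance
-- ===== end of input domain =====

-- B re-decomposes A's stateful accumulator loop into a two-phase tag-then-group-runs pass (objective: alternative/simpler decomposition, same cost).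

-- ===== PORT A =====
-- A's loop state: (elements, current type, current content)
def pvAStep (st : List (List (String × String)) × String × String) (line : String) :
    List (List (String × String)) × String × String :=
  let elements := st.1
  let ctype := st.2.1
  let ccontent := st.2.2
  if PySem.Str.isIn "|" line ∧ 2 ≤ PySem.Str.count line "|" then
    if ctype ≠ "table" then
      ((if PySem.Str.strip ccontent ≠ "" then elements ++ [[("type", ctype), ("content", ccontent)]] else elements),
       "table", line ++ "\n")
    else
      (elements, ctype, ccontent ++ (line ++ "\n"))
  else if PySem.Str.startswith line "![" then
    ((if PySem.Str.strip ccontent ≠ "" then elements ++ [[("type", ctype), ("content", ccontent)]] else elements)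
       ++ [[("type", "figure"), ("content", line)]],
     "text", "")
  else
    if ctype ≠ "text" then
      ((if PySem.Str.strip ccontent ≠ "" then elements ++ [[("type", ctype), ("content", ccontent)]] else elements),
       "text", line ++ "\n")
    else
      (elements, ctype, ccontent ++ (line ++ "\n"))

def identify_structured_elements_py (markdown_content : String) : List (List (String × String)) :=
  let lines := (PySem.Str.split? markdown_content "\n").getD []
  let r := lines.foldl pvAStep ([], "text", "")
  if PySem.Str.strip r.2.2 ≠ "" then r.1 ++ [[("type", r.2.1), ("content", r.2.2)]] else r.1

-- ===== PORT B =====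
def pvTag (line : String) : String :=
  if PySem.Str.isIn "|" line ∧ 2 ≤ PySem.Str.count line "|" then "table"
  else if PySem.Str.startswith line "![" then "figure"
  else "text"

-- ''.join(l + '\n' for l in run)
def pvJoinNl (run : List String) : String := PySem.Str.join "" (run.map (fun l => l ++ "\n"))

-- the grouping pass: figures are emitted alone; a maximal run of equal non-figure tags becomes one element
def pvBGroup : List (String × String) → List (List (String × String))
  | [] => []
  | (t, l) :: rest =>
    if t = "figure" then
      [("type", "figure"), ("content", l)] :: pvBGroup rest
    else
      let content := pvJoinNl (l :: (rest.takeWhile (fun p => p.1 = t)).map Prod.snd)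
      (if PySem.Str.strip content ≠ "" then [[("type", t), ("content", content)]] else []) ++
        pvBGroup (rest.dropWhile (fun p => p.1 = t))
  termination_by tl => tl.length
  decreasing_by
    · simp
    · simp only [List.length_cons]
      exact Nat.lt_succ_of_le (List.length_dropWhile_le _ _)

def identify_structured_elements_py_alt (markdown_content : String) : List (List (String × String)) :=
  let lines := (PySem.Str.split? markdown_content "\n").getD []
  pvBGroup (lines.map (fun l => (pvTag l, l)))

-- ===== PRECONDITION & SPEC =====
def Spec_identify_structured_elements_py (markdown_content : String) (out : List (List (String × String))) : Prop := out = identify_structured_elements_py_alt markdown_content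
instance (markdown_content : String) (out : List (List (String × String))) : Decidable (Spec_identify_structured_elements_py markdown_content out) := by unfold Spec_identify_structured_elements_py; infer_instance

-- ===== CLAIM (what is proved, stated in full; the proofs are below) =====
def Claim_equal_identify_structured_elements_py : Prop := ∀ (markdown_content : String), Dom_identify_structured_elements_py markdown_content → Spec_identify_structured_elements_py markdown_content (identify_structured_elements_py markdown_content)

-- ===== LEMMAS AND PROOFS =====

-- 'append the pending element if its stripped content is non-empty'
def pvEmit (t c : String) : List (List (String × String)) :=
  if PySem.Str.strip c ≠ "" then [[("type", t), ("content", c)]] else []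

-- A's loop, unrolled with the pending element made explicit
def pvH (t c : String) : List String → List (List (String × String))
  | [] => pvEmit t c
  | l :: ls =>
    if pvTag l = "figure" then
      pvEmit t c ++ ([("type", "figure"), ("content", l)] :: pvH "text" "" ls)
    else if pvTag l = t then
      pvH t (c ++ (l ++ "\n")) ls
    else
      pvEmit t c ++ pvH (pvTag l) (l ++ "\n") ls

-- B's grouping continued from a pending open run (t, c)
def pvCont (t c : String) (tl : List (String × String)) : List (List (String × String)) :=
  pvEmit t (c ++ pvJoinNl ((tl.takeWhile (fun p => p.1 = t)).map Prod.snd)) ++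
    pvBGroup (tl.dropWhile (fun p => p.1 = t))

theorem pvJoinNl_nil : pvJoinNl [] = "" := rfl

theorem pvJoinNl_cons (x : String) (xs : List String) :
    pvJoinNl (x :: xs) = (x ++ "\n") ++ pvJoinNl xs := by
  apply String.toList_inj.mp
  cases xs with
  | nil => simp [pvJoinNl, PySem.Str.join, PySem.Chars.join, List.intercalate]
  | cons y ys => simp [pvJoinNl, PySem.Str.join, PySem.Chars.join_cons_cons]

theorem pvFlush (elements : List (List (String × String))) (t c : String) :
    (if PySem.Str.strip c ≠ "" then elements ++ [[("type", t), ("content", c)]] else elements) =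
      elements ++ pvEmit t c := by
  unfold pvEmit; split_ifs <;> simp

-- A's fold, finalized, equals elements ++ pvH t c lines (for a non-figure pending type)
theorem pvA_fold_eq (lines : List String) :
    ∀ (elements : List (List (String × String))) (t c : String), t = "text" ∨ t = "table" →
      (let r := lines.foldl pvAStep (elements, t, c);
       if PySem.Str.strip r.2.2 ≠ "" then r.1 ++ [[("type", r.2.1), ("content", r.2.2)]] else r.1) =
      elements ++ pvH t c lines := by
  induction lines with
  | nil =>
    intro elements t c _
    simp only [List.foldl_nil, pvH]
    exact pvFlush elements t c
  | cons l ls ih =>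
    intro elements t c ht
    simp only [List.foldl_cons]
    by_cases h1 : PySem.Str.isIn "|" l ∧ 2 ≤ PySem.Str.count l "|"
    · -- table line
      have htag : pvTag l = "table" := by unfold pvTag; rw [if_pos h1]
      rcases ht with ht | ht
      · -- pending text: flush, open table run
        have : pvAStep (elements, t, c) l =
            (elements ++ pvEmit t c, "table", l ++ "\n") := by
          subst ht
          simp only [pvAStep]
          rw [if_pos h1, if_pos (by decide), pvFlush]
        rw [this, ih _ _ _ (Or.inr rfl)]
        simp [pvH, htag, ht]
      · -- pending table: extend
        have : pvAStep (elements, t, c) l = (elements, t, c ++ (l ++ "\n")) := by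
          subst ht
          simp only [pvAStep]
          rw [if_pos h1, if_neg (by simp)]
        rw [this, ih _ _ _ (Or.inr ht)]
        simp [pvH, htag, ht]
    · by_cases h2 : PySem.Str.startswith l "![" = true
      · -- figure line
        have htag : pvTag l = "figure" := by unfold pvTag; rw [if_neg h1, if_pos h2]
        have : pvAStep (elements, t, c) l =
            ((elements ++ pvEmit t c) ++ [[("type", "figure"), ("content", l)]], "text", "") := by
          simp only [pvAStep]
          rw [if_neg h1, if_pos h2, pvFlush]
        rw [this, ih _ _ _ (Or.inl rfl)]
        simp [pvH, htag]
      · -- text line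
        have htag : pvTag l = "text" := by unfold pvTag; rw [if_neg h1, if_neg h2]
        rcases ht with ht | ht
        · have : pvAStep (elements, t, c) l = (elements, t, c ++ (l ++ "\n")) := by
            subst ht
            simp only [pvAStep]
            rw [if_neg h1, if_neg h2, if_neg (by simp)]
          rw [this, ih _ _ _ (Or.inl ht)]
          simp [pvH, htag, ht]
        · have : pvAStep (elements, t, c) l =
              (elements ++ pvEmit t c, "text", l ++ "\n") := by
            subst ht
            simp only [pvAStep]
            rw [if_neg h1, if_neg h2, if_pos (by decide), pvFlush]
          rw [this, ih _ _ _ (Or.inl rfl)]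
          simp [pvH, htag, ht]

-- unfolding pvBGroup at a non-figure head gives a pvCont
theorem pvEmit_empty (t : String) : pvEmit t "" = [] := by
  unfold pvEmit
  rw [if_neg]
  decide

theorem pvBGroup_cons_of_ne (t l : String) (rest : List (String × String)) (h : t ≠ "figure") :
    pvBGroup ((t, l) :: rest) = pvCont t (l ++ "\n") rest := by
  rw [pvBGroup]
  simp only [h, if_false, pvCont]
  rw [pvJoinNl_cons]
  simp only [pvEmit]

-- pvCont with an empty pending text run is just pvBGroup
theorem pvCont_text_empty (tl : List (String × String)) :
    pvCont "text" "" tl = pvBGroup tl := by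
  cases tl with
  | nil => simp [pvCont, pvBGroup, pvJoinNl_nil, pvEmit_empty]
  | cons p rest =>
    obtain ⟨t0, l0⟩ := p
    by_cases h : t0 = "text"
    · subst h
      rw [pvBGroup_cons_of_ne _ _ _ (by decide)]
      unfold pvCont
      rw [List.takeWhile_cons_of_pos (p := fun p : String × String => decide (p.1 = "text")) (by simp), List.dropWhile_cons_of_pos (p := fun p : String × String => decide (p.1 = "text")) (by simp)]
      simp only [List.map_cons, pvJoinNl_cons, String.empty_append, String.append_assoc]
    · unfold pvCont
      rw [List.takeWhile_cons_of_neg (p := fun p : String × String => decide (p.1 = "text")) (by simpa using h), List.dropWhile_cons_of_neg (p := fun p : String × String => decide (p.1 = "text")) (by simpa using h)]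
      simp [pvJoinNl_nil, pvEmit_empty]

-- A's unrolled loop equals B's grouping continued from the pending run
theorem pvH_eq_pvCont (lines : List String) :
    ∀ (t c : String), t ≠ "figure" →
      pvH t c lines = pvCont t c (lines.map (fun l => (pvTag l, l))) := by
  induction lines with
  | nil =>
    intro t c _
    simp [pvH, pvCont, pvJoinNl_nil, pvBGroup, pvEmit]
  | cons l ls ih =>
    intro t c ht
    rw [pvH, List.map_cons]
    by_cases hf : pvTag l = "figure"
    · have hb : ¬ ((fun p : String × String => decide (p.1 = t)) (pvTag l, l) = true) := by
        simp only [decide_eq_true_eq]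
        intro h; exact ht (h ▸ hf)
      rw [if_pos hf]
      unfold pvCont
      rw [List.takeWhile_cons_of_neg (p := fun p : String × String => decide (p.1 = t)) hb, List.dropWhile_cons_of_neg (p := fun p : String × String => decide (p.1 = t)) hb]
      rw [pvBGroup]
      rw [if_pos hf]
      rw [ih "text" "" (by decide), pvCont_text_empty]
      simp [pvJoinNl_nil]
    · rw [if_neg hf]
      by_cases he : pvTag l = t
      · rw [if_pos he, ih t (c ++ (l ++ "\n")) ht]
        unfold pvCont
        rw [List.takeWhile_cons_of_pos (p := fun p : String × String => decide (p.1 = t)) (by simpa using he), List.dropWhile_cons_of_pos (p := fun p : String × String => decide (p.1 = t)) (by simpa using he)]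
        simp only [List.map_cons, pvJoinNl_cons, String.append_assoc]
      · rw [if_neg he, ih (pvTag l) (l ++ "\n") hf]
        unfold pvCont
        rw [List.takeWhile_cons_of_neg (p := fun p : String × String => decide (p.1 = t)) (by simpa using he), List.dropWhile_cons_of_neg (p := fun p : String × String => decide (p.1 = t)) (by simpa using he)]
        rw [pvBGroup_cons_of_ne _ _ _ hf]
        simp [pvJoinNl_nil, pvCont]

-- ===== VERDICT (by name: the statement is the Claim_ definition above) =====
theorem identify_structured_elements_py_spec : Claim_equal_identify_structured_elements_py := by
  intro md _
  unfold Spec_identify_structured_elements_py identify_structured_elements_py identify_structured_elements_py_alt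
  have h := pvA_fold_eq ((PySem.Str.split? md "\n").getD []) [] "text" "" (Or.inl rfl)
  simp only at h
  rw [h, pvH_eq_pvCont _ _ _ (by decide), pvCont_text_empty]
  simp
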